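-- pv_equiv track=rewrite | github.com/jpsamuelson/aurora-icepower-booster | scripts/pcb/fix_placement_v2.py | strip_zone_fills
-- ===== SOURCE A (Python) =====
-- def strip_zone_fills(content):
--     """Remove filled_polygon blocks from zones (keep zone definitions)."""
--     # Simple approach: remove all (filled_polygon ...) blocks
--     result = []
--     lines = content.split('\n')
--     i = 0
--     removed = 0
--     while i < len(lines):
--         stripped = lines[i].strip()
--         if stripped.startswith('(filled_polygon'):
--             depth = 0
--             while i < len(lines):
--                 for ch in lines[i]:
--                     if ch == '(': depth += 1
--                     elif ch == ')': depth -= 1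
--                 if depth <= 0:
--                     i += 1
--                     break
--                 i += 1
--             removed += 1
--             continue
--         result.append(lines[i])
--         i += 1
--     return '\n'.join(result), removed
-- ===== SOURCE B (Python) =====
-- def strip_zone_fills(content):
--     """Remove filled_polygon blocks from zones (keep zone definitions)."""
--     lines = content.split('\n')
--     n = len(lines)
--     # Pass 1: prefix sums of paren balance: P[k] = balance of lines[:k].
--     P = [0]
--     for line in lines:
--         P.append(P[-1] + line.count('(') - line.count(')'))
--     # Pass 2 (right to left): jump table nxt[k] = smallest m > k with
--     # P[m] <= P[k], or n+1 if none; already-computed pointers bridge the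
--     # skipped indices instead of rescanning them.
--     nxt = [n + 1] * (n + 1)
--     for k in range(n - 1, -1, -1):
--         m = k + 1
--         while m <= n and P[m] > P[k]:
--             m = nxt[m]
--         nxt[k] = m
--     # Pass 3: emit the lines outside blocks; a block starting at line i
--     # covers lines i..nxt[i]-1 (to EOF when the block is unterminated).
--     out = []
--     removed = 0
--     i = 0
--     while i < n:
--         if lines[i].strip().startswith('(filled_polygon'):
--             removed += 1
--             i = min(nxt[i], n)
--         else:
--             out.append(lines[i])
--             i += 1
--     return '\n'.join(out), removed
-- ===== Notes on version B (the rewrite author's own statement) =====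
-- stated objective: alternative
-- what changed: A's nested whiles (outer scan + inner per-character depth rescan from a shared index) are replaced by three staged passes: prefix sums of per-line paren balance, a right-to-left jump table nxt[k] = first m>k with P[m]<=P[k] computed by following already-built pointers (path-sparse next-smaller-or-equal), and a final emit pass that jumps over whole blocks via the table.
import Mathlib
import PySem

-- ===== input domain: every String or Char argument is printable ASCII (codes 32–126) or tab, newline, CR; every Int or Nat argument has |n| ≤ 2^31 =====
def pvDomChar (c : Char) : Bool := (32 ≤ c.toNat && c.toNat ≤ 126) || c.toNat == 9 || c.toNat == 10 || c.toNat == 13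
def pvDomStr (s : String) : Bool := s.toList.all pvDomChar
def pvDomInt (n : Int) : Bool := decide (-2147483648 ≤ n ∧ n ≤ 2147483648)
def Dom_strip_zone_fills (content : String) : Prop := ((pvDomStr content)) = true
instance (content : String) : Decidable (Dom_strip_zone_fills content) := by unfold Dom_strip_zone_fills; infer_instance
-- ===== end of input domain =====

-- B replaces A's nested whiles by three staged passes: per-line paren-balance prefix
-- sums, a right-to-left jump table of next-smaller-or-equal prefix indices, and an
-- emit pass that skips whole blocks via the table (objective: alternative algorithm).

-- ===== PORT A =====
-- A's inner 'for ch in lines[i]' paren-depth loop.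
def pvCharDepth (line : List Char) (d : Int) : Int :=
  line.foldl (fun d ch => if ch = '(' then d + 1 else if ch = ')' then d - 1 else d) d

-- A's inner 'while i < len(lines)' loop: consume lines until depth ≤ 0, return the remainder.
def pvAInner (lines : List (List Char)) (depth : Int) : List (List Char) :=
  match lines with
  | [] => []
  | l :: rest =>
    let d := pvCharDepth l depth
    if d ≤ 0 then rest else pvAInner rest d

-- termination helper for pvAOuter (the inner loop strictly consumes the list)
theorem pvAInner_length_le : ∀ (ls : List (List Char)) (d : Int), (pvAInner ls d).length ≤ ls.length - 1 := by
  intro ls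
  induction ls with
  | nil => intro d; simp [pvAInner]
  | cons l rest ih =>
    intro d
    simp only [pvAInner]
    split
    · simp
    · have := ih (pvCharDepth l d)
      simp only [List.length_cons]
      omega

-- A's outer 'while i < len(lines)' loop over the remaining lines.
def pvAOuter (lines : List (List Char)) : List (List Char) × Int :=
  match lines with
  | [] => ([], 0)
  | l :: rest =>
    if PySem.Chars.startswith (PySem.Chars.strip l) "(filled_polygon".toList then
      let p := pvAOuter (pvAInner (l :: rest) 0)
      (p.1, p.2 + 1)
    else
      let p := pvAOuter rest
      (l :: p.1, p.2)
termination_by lines.length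
decreasing_by
  · have := pvAInner_length_le (l :: rest) 0
    simp only [List.length_cons] at *
    omega
  · simp

def strip_zone_fills (content : String) : String × Int :=
  let p := pvAOuter (PySem.Chars.splitOn content.toList "\n".toList)
  (String.ofList (PySem.Chars.join "\n".toList p.1), p.2)

-- ===== PORT B =====
-- line.count('(') - line.count(')')
def pvBDiff (line : List Char) : Int :=
  (PySem.Chars.count line "(".toList : Int) - (PySem.Chars.count line ")".toList : Int)

-- Pass 1: 'P = [0]; for line in lines: P.append(P[-1] + ...)'
def pvPrefix (lines : List (List Char)) : List Int :=
  lines.foldl (fun P line => P ++ [P.getLastD 0 + pvBDiff line]) [0]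

-- Pass 2, inner 'while m <= n and P[m] > P[k]: m = nxt[m]'
def pvJump (P : List Int) (nxt : List Nat) (n : Nat) (t : Int) : Nat → Nat → Nat
  | 0, m => m
  | fuel+1, m => if m ≤ n ∧ P.getD m 0 > t then pvJump P nxt n t fuel (nxt.getD m (n+1)) else m

-- Pass 2, outer 'for k in range(n-1, -1, -1)': first argument counts the remaining k's
def pvNxtLoop (P : List Int) (n : Nat) : Nat → List Nat → List Nat
  | 0, nxt => nxt
  | c+1, nxt =>
    let m := pvJump P nxt n (P.getD c 0) (n+2) (c+1)
    pvNxtLoop P n c (nxt.set c m)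

-- Pass 3: 'while i < n: …' (fuel = n makes the index loop total; i strictly increases)
def pvEmit (lines : List (List Char)) (nxt : List Nat) (n : Nat) : Nat → Nat → List (List Char) → Int → List (List Char) × Int
  | 0, _, out, rem => (out, rem)
  | fuel+1, i, out, rem =>
    if i < n then
      let l := lines.getD i []
      if PySem.Chars.startswith (PySem.Chars.strip l) "(filled_polygon".toList then
        pvEmit lines nxt n fuel (min (nxt.getD i (n+1)) n) out (rem + 1)
      else
        pvEmit lines nxt n fuel (i+1) (out ++ [l]) rem
    else (out, rem)

def strip_zone_fills_alt (content : String) : String × Int :=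
  let lines := PySem.Chars.splitOn content.toList "\n".toList
  let n := lines.length
  let P := pvPrefix lines
  let nxt := pvNxtLoop P n n (List.replicate (n+1) (n+1))
  let st := pvEmit lines nxt n n 0 [] 0
  (String.ofList (PySem.Chars.join "\n".toList st.1), st.2)

-- ===== PRECONDITION & SPEC =====
def Spec_strip_zone_fills (content : String) (out : String × Int) : Prop := out = strip_zone_fills_alt content
instance (content : String) (out : String × Int) : Decidable (Spec_strip_zone_fills content out) := by unfold Spec_strip_zone_fills; infer_instance

-- ===== CLAIM (what is proved, stated in full; the proofs are below) =====
def Claim_equal_strip_zone_fills : Prop := ∀ (content : String), Dom_strip_zone_fills content → Spec_strip_zone_fills content (strip_zone_fills content)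

-- ===== LEMMAS AND PROOFS =====

-- balance of the first i lines (the value P[i] of pass 1)
def pvPf (lines : List (List Char)) (i : Nat) : Int := ((lines.take i).map pvBDiff).sum

-- first m' ≥ m with Pf m' ≤ t (n+1 if none): the value pass 2 computes
def pvG (lines : List (List Char)) (t : Int) (m : Nat) : Nat :=
  if m ≤ lines.length then
    (if pvPf lines m ≤ t then m else pvG lines t (m+1))
  else lines.length + 1
termination_by lines.length + 1 - m

def pvNxtSpec (lines : List (List Char)) (k : Nat) : Nat := pvG lines (pvPf lines k) (k+1)

-- running-sum tail produced by pass 1 after the seed [0]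
def pvTail (s : Int) : List (List Char) → List Int
  | [] => []
  | l :: ls => (s + pvBDiff l) :: pvTail (s + pvBDiff l) ls

theorem pvPrefix_aux : ∀ (ls : List (List Char)) (acc : List Int) (s : Int), acc.getLastD 0 = s →
    ls.foldl (fun P line => P ++ [P.getLastD 0 + pvBDiff line]) acc = acc ++ pvTail s ls := by
  intro ls
  induction ls with
  | nil => intro acc s h; simp [pvTail]
  | cons l rest ih =>
    intro acc s h
    simp only [List.foldl_cons, pvTail, h]
    rw [ih (acc ++ [s + pvBDiff l]) (s + pvBDiff l) (by simp)]
    simp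

theorem pvTail_getD : ∀ (ls : List (List Char)) (s : Int) (j : Nat), j < ls.length →
    (pvTail s ls).getD j 0 = s + pvPf ls (j+1) := by
  intro ls
  induction ls with
  | nil => intro s j h; simp at h
  | cons l rest ih =>
    intro s j h
    cases j with
    | zero => simp [pvTail, pvPf, List.take_add_one]
    | succ j =>
      simp only [pvTail, List.getD_cons_succ]
      rw [ih (s + pvBDiff l) j (by simpa using h)]
      simp only [pvPf, List.take_succ_cons, List.map_cons, List.sum_cons]
      ring

theorem pvPrefix_getD (lines : List (List Char)) (k : Nat) (hk : k ≤ lines.length) :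
    (pvPrefix lines).getD k 0 = pvPf lines k := by
  have h := pvPrefix_aux lines [0] 0 (by simp)
  unfold pvPrefix
  rw [h]
  cases k with
  | zero => simp [pvPf]
  | succ j =>
    simp only [List.singleton_append, List.getD_cons_succ]
    rw [pvTail_getD lines 0 j (by omega)]
    omega

theorem pvPf_succ (lines : List (List Char)) (i : Nat) (h : i < lines.length) :
    pvPf lines (i+1) = pvPf lines i + pvBDiff (lines.getD i []) := by
  simp only [pvPf, List.take_add_one, List.getElem?_eq_getElem h, List.getD,
    Option.toList_some, List.map_append, List.sum_append, List.map_cons, List.map_nil,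
    List.sum_cons, List.sum_nil, Option.getD_some]
  ring

theorem pvG_ge (lines : List (List Char)) (t : Int) : ∀ (d m : Nat), lines.length + 1 - m ≤ d →
    m ≤ lines.length + 1 → m ≤ pvG lines t m := by
  intro d
  induction d with
  | zero =>
    intro m h1 h2
    rw [pvG, if_neg (by omega)]
    omega
  | succ d ih =>
    intro m h1 h2
    rw [pvG]
    by_cases hm : m ≤ lines.length
    · rw [if_pos hm]
      by_cases hp : pvPf lines m ≤ t
      · rw [if_pos hp]
      · rw [if_neg hp]
        have := ih (m+1) (by omega) (by omega)
        omega
    · rw [if_neg hm]; omega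

theorem pvG_le (lines : List (List Char)) (t : Int) : ∀ (d m : Nat), lines.length + 1 - m ≤ d →
    pvG lines t m ≤ lines.length + 1 := by
  intro d
  induction d with
  | zero =>
    intro m h1
    rw [pvG, if_neg (by omega)]
  | succ d ih =>
    intro m h1
    rw [pvG]
    by_cases hm : m ≤ lines.length
    · rw [if_pos hm]
      by_cases hp : pvPf lines m ≤ t
      · rw [if_pos hp]; omega
      · rw [if_neg hp]
        exact ih (m+1) (by omega)
    · rw [if_neg hm]

theorem pvG_before (lines : List (List Char)) (t : Int) : ∀ (d m j : Nat), lines.length + 1 - m ≤ d →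
    m ≤ j → j < pvG lines t m → pvPf lines j > t := by
  intro d
  induction d with
  | zero =>
    intro m j h1 h2 h3
    rw [pvG, if_neg (by omega)] at h3
    omega
  | succ d ih =>
    intro m j h1 h2 h3
    rw [pvG] at h3
    by_cases hm : m ≤ lines.length
    · rw [if_pos hm] at h3
      by_cases hp : pvPf lines m ≤ t
      · rw [if_pos hp] at h3; omega
      · rw [if_neg hp] at h3
        by_cases hj : m = j
        · subst hj; omega
        · exact ih (m+1) j (by omega) (by omega) h3
    · rw [if_neg hm] at h3
      omega

theorem pvG_skip (lines : List (List Char)) (t : Int) : ∀ (d m : Nat), m + d ≤ lines.length + 1 →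
    (∀ j, m ≤ j → j < m + d → pvPf lines j > t) → pvG lines t m = pvG lines t (m + d) := by
  intro d
  induction d with
  | zero => intro m _ _; rfl
  | succ d ih =>
    intro m h1 h2
    have hm : m ≤ lines.length := by omega
    rw [pvG, if_pos hm, if_neg (by have := h2 m le_rfl (by omega); omega)]
    have := ih (m+1) (by omega) (fun j hj1 hj2 => h2 j (by omega) (by omega))
    rw [this]
    congr 1
    omega

-- counting a single-character substring is counting that character
theorem pvCountGoSingle (c : Char) : ∀ (cs : List Char) (fuel acc : Nat), cs.length ≤ fuel →
    PySem.Chars.count.go [c] fuel cs acc = acc + cs.count c := by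
  intro cs
  induction cs with
  | nil => intro fuel acc h; cases fuel <;> simp [PySem.Chars.count.go]
  | cons hd t ih =>
    intro fuel acc h
    cases fuel with
    | zero => simp at h
    | succ f =>
      simp only [PySem.Chars.count.go, List.isPrefixOf, List.count_cons]
      by_cases hc : c = hd
      · subst hc
        simp only [beq_self_eq_true, Bool.true_and, if_true, List.length_cons, List.length_nil,
          List.drop_succ_cons, List.drop_zero]
        rw [ih f (acc + 1) (by simpa using h)]
        omega
      · have hcb : (c == hd) = false := by simp [hc]
        simp only [hcb, Bool.false_and]
        rw [if_neg (by simp)]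
        rw [ih f acc (by simpa using h)]
        have : (hd == c) = false := by simp [Ne.symm hc]
        simp [this]

theorem pvCountSingle (cs : List Char) (c : Char) : PySem.Chars.count cs [c] = cs.count c := by
  simp [PySem.Chars.count, pvCountGoSingle c cs cs.length 0 le_rfl]

theorem pvFoldDepth : ∀ (cs : List Char) (d : Int),
    cs.foldl (fun d ch => if ch = '(' then d + 1 else if ch = ')' then d - 1 else d) d
      = d + (cs.count '(' : Int) - (cs.count ')' : Int) := by
  intro cs
  induction cs with
  | nil => intro d; simp
  | cons hd t ih =>
    intro d
    simp only [List.foldl_cons, List.count_cons, ih]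
    by_cases h1 : hd = '('
    · subst h1; simp; omega
    · by_cases h2 : hd = ')'
      · subst h2; simp [h1]; omega
      · simp [h1, h2]

theorem pvDepthEq (l : List Char) (d : Int) : pvCharDepth l d = d + pvBDiff l := by
  have h1 : ("(" : String).toList = ['('] := rfl
  have h2 : (")" : String).toList = [')'] := rfl
  simp only [pvCharDepth, pvBDiff, pvFoldDepth, h1, h2, pvCountSingle]
  omega

-- pass-2 inner while computes pvG
theorem pvJump_spec (lines : List (List Char)) (P : List Int) (nxt : List Nat) (t : Int) (c : Nat)
    (HP : ∀ j, j ≤ lines.length → P.getD j 0 = pvPf lines j)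
    (Hnxt : ∀ j, c < j → j ≤ lines.length → nxt.getD j (lines.length+1) = pvNxtSpec lines j) :
    ∀ (fuel m : Nat), c < m → m ≤ lines.length + 1 → lines.length + 2 - m ≤ fuel →
      pvJump P nxt lines.length t fuel m = pvG lines t m := by
  intro fuel
  induction fuel with
  | zero => intro m h1 h2 h3; omega
  | succ fuel ih =>
    intro m h1 h2 h3
    simp only [pvJump]
    by_cases hc : m ≤ lines.length ∧ P.getD m 0 > t
    · rw [if_pos hc]
      obtain ⟨hm, hgt⟩ := hc
      rw [HP m hm] at hgt
      rw [Hnxt m h1 hm, pvNxtSpec]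
      set m' := pvG lines (pvPf lines m) (m+1) with hm'def
      have hge : m + 1 ≤ m' := pvG_ge lines (pvPf lines m) (lines.length + 1) (m+1) (by omega) (by omega)
      have hle : m' ≤ lines.length + 1 := pvG_le lines (pvPf lines m) (lines.length + 1) (m+1) (by omega)
      rw [ih m' (by omega) hle (by omega)]
      have hskip := pvG_skip lines t (m' - m) m (by omega)
        (fun j hj1 hj2 => by
          by_cases hjm : j = m
          · subst hjm; exact hgt
          · have := pvG_before lines (pvPf lines m) (lines.length + 1) (m+1) j (by omega) (by omega) (by omega)
            omega)
      rw [hskip]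
      congr 1
      omega
    · rw [if_neg hc]
      by_cases hm : m ≤ lines.length
      · have hnb := not_and.mp hc hm
        have hp : pvPf lines m ≤ t := by rw [HP m hm] at hnb; omega
        rw [pvG, if_pos hm, if_pos hp]
      · rw [pvG, if_neg hm]
        omega

-- pass-2 outer loop fills the table with pvNxtSpec
theorem pvNxtLoop_spec (lines : List (List Char)) (P : List Int)
    (HP : ∀ j, j ≤ lines.length → P.getD j 0 = pvPf lines j) :
    ∀ (c : Nat) (nxt : List Nat), c ≤ lines.length + 1 → nxt.length = lines.length + 1 →
      (∀ j, c ≤ j → j ≤ lines.length → nxt.getD j (lines.length+1) = pvNxtSpec lines j) →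
      ∀ j, j ≤ lines.length → (pvNxtLoop P lines.length c nxt).getD j (lines.length+1) = pvNxtSpec lines j := by
  intro c
  induction c with
  | zero =>
    intro nxt _ _ hinv j hj
    simp only [pvNxtLoop]
    exact hinv j (Nat.zero_le j) hj
  | succ c ih =>
    intro nxt hc hlen hinv j hj
    simp only [pvNxtLoop]
    have hcn : c ≤ lines.length := by omega
    have hjump : pvJump P nxt lines.length (P.getD c 0) (lines.length+2) (c+1) = pvNxtSpec lines c := by
      rw [pvJump_spec lines P nxt (P.getD c 0) c HP
            (fun j hj1 hj2 => hinv j (by omega) hj2) (lines.length+2) (c+1) (by omega) (by omega) (by omega)]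
      rw [HP c hcn, pvNxtSpec]
    rw [hjump]
    refine ih (nxt.set c (pvNxtSpec lines c)) (by omega) (by simp [hlen]) ?_ j hj
    intro j' hj1 hj2
    by_cases hjc : j' = c
    · subst hjc
      rw [List.getD, List.getElem?_set_self (by omega)]
      rfl
    · rw [List.getD, List.getElem?_set_ne (by omega)]
      exact hinv j' (by omega) hj2

-- A's inner skip loop lands exactly where the jump table points
theorem pvAInner_drop (lines : List (List Char)) (t : Int) : ∀ (i : Nat), i ≤ lines.length →
    pvAInner (lines.drop i) (pvPf lines i - t) = lines.drop (min (pvG lines t (i+1)) lines.length) := by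
  have main : ∀ (d i : Nat), lines.length - i ≤ d → i ≤ lines.length →
      pvAInner (lines.drop i) (pvPf lines i - t) = lines.drop (min (pvG lines t (i+1)) lines.length) := by
    intro d
    induction d with
    | zero =>
      intro i h1 h2
      have hi : i = lines.length := by omega
      subst hi
      rw [List.drop_length]
      rw [pvG, if_neg (by omega)]
      simp [pvAInner]
    | succ d ih =>
      intro i h1 h2
      by_cases hi : i < lines.length
      · have hdrop : lines.drop i = lines.getD i [] :: lines.drop (i+1) := by
          rw [List.drop_eq_getElem_cons hi, List.getD, List.getElem?_eq_getElem hi]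
          rfl
        rw [hdrop]
        simp only [pvAInner]
        rw [pvDepthEq]
        have hstep : pvPf lines i - t + pvBDiff (lines.getD i []) = pvPf lines (i+1) - t := by
          rw [pvPf_succ lines i hi]; ring
        rw [hstep]
        by_cases hle : pvPf lines (i+1) - t ≤ 0
        · rw [if_pos hle]
          rw [pvG, if_pos (by omega), if_pos (by omega)]
          rw [Nat.min_eq_left (by omega)]
        · rw [if_neg hle]
          rw [pvG, if_pos (by omega), if_neg (by omega)]
          exact ih (i+1) (by omega) (by omega)
      · have hi2 : i = lines.length := by omega
        subst hi2
        rw [List.drop_length]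
        rw [pvG, if_neg (by omega)]
        simp [pvAInner]
  exact fun i hi => main lines.length i (by omega) hi

-- pass 3 computes A's outer loop
theorem pvEmit_spec (lines : List (List Char)) (nxt : List Nat)
    (Hnxt : ∀ j, j ≤ lines.length → nxt.getD j (lines.length+1) = pvNxtSpec lines j) :
    ∀ (fuel i : Nat) (out : List (List Char)) (rem : Int), i ≤ lines.length → lines.length - i ≤ fuel →
      pvEmit lines nxt lines.length fuel i out rem
        = (out ++ (pvAOuter (lines.drop i)).1, rem + (pvAOuter (lines.drop i)).2) := by
  intro fuel
  induction fuel with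
  | zero =>
    intro i out rem h1 h2
    have hi : i = lines.length := by omega
    subst hi
    rw [List.drop_length]
    simp [pvEmit, pvAOuter]
  | succ fuel ih =>
    intro i out rem h1 h2
    simp only [pvEmit]
    by_cases hi : i < lines.length
    · rw [if_pos hi]
      have hdrop : lines.drop i = lines.getD i [] :: lines.drop (i+1) := by
        rw [List.drop_eq_getElem_cons hi, List.getD, List.getElem?_eq_getElem hi]
        rfl
      by_cases hs : PySem.Chars.startswith (PySem.Chars.strip (lines.getD i [])) "(filled_polygon".toList = true
      · rw [if_pos hs]
        have hinner : pvAInner (lines.drop i) 0 = lines.drop (min (pvG lines (pvPf lines i) (i+1)) lines.length) := by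
          have := pvAInner_drop lines (pvPf lines i) i (by omega)
          rwa [sub_self] at this
        have hnxti : nxt.getD i (lines.length+1) = pvG lines (pvPf lines i) (i+1) := by
          rw [Hnxt i (by omega)]; rfl
        have hge : i + 1 ≤ pvG lines (pvPf lines i) (i+1) :=
          pvG_ge lines (pvPf lines i) (lines.length + 1) (i+1) (by omega) (by omega)
        rw [hnxti]
        rw [ih (min (pvG lines (pvPf lines i) (i+1)) lines.length) out (rem+1)
              (Nat.min_le_right _ _) (by omega)]
        conv_rhs => rw [hdrop, pvAOuter]
        rw [if_pos hs]
        rw [← hdrop, hinner]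
        simp only [Prod.mk.injEq]
        exact ⟨trivial, by ring⟩
      · rw [if_neg hs]
        rw [ih (i+1) (out ++ [lines.getD i []]) rem (by omega) (by omega)]
        conv_rhs => rw [hdrop, pvAOuter]
        rw [if_neg hs]
        simp
    · rw [if_neg hi]
      have hi2 : i = lines.length := by omega
      subst hi2
      rw [List.drop_length]
      simp [pvAOuter]

-- ===== VERDICT (by name: the statement is the Claim_ definition above) =====
theorem strip_zone_fills_spec : Claim_equal_strip_zone_fills := by
  unfold Claim_equal_strip_zone_fills
  intro content _
  unfold Spec_strip_zone_fills strip_zone_fills strip_zone_fills_alt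
  set lines := PySem.Chars.splitOn content.toList "\n".toList with hlines
  have HP : ∀ j, j ≤ lines.length → (pvPrefix lines).getD j 0 = pvPf lines j :=
    fun j hj => pvPrefix_getD lines j hj
  have hinit : ∀ j, lines.length ≤ j → j ≤ lines.length →
      (List.replicate (lines.length+1) (lines.length+1)).getD j (lines.length+1) = pvNxtSpec lines j := by
    intro j hj1 hj2
    have hj : j = lines.length := by omega
    subst hj
    rw [List.getD, List.getElem?_replicate_of_lt (by omega)]
    rw [pvNxtSpec, pvG, if_neg (by omega)]
    rfl
  have Hnxt := pvNxtLoop_spec lines (pvPrefix lines) HP lines.length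
    (List.replicate (lines.length+1) (lines.length+1)) (by omega) (by simp) hinit
  have Hemit := pvEmit_spec lines
    (pvNxtLoop (pvPrefix lines) lines.length lines.length (List.replicate (lines.length+1) (lines.length+1)))
    Hnxt lines.length 0 [] 0 (Nat.zero_le _) (by omega)
  rw [List.drop_zero] at Hemit
  simp only [Hemit, List.nil_append, zero_add]
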